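-- pv_equiv track=rewrite | github.com/im-jonathan/hackerRankProblemSolving | greedy/priyankAndToys.py | toys
-- ===== SOURCE A (Python) =====
-- def toys(w: list) -> int:
--     # Write your code here
--     i = 0
--     w = set(w)
--     while len(w) > 0:
--         i += 1
--         m = min(w)
--         w = w.difference(set(range(m, m + 5)))
--
--     return i
-- ===== SOURCE B (Python) =====
-- def toys(w: list) -> int:
--     count = 0
--     last = None
--     for v in sorted(set(w)):
--         if last is None or v > last + 4:
--             count += 1
--             last = v
--     return count
-- ===== Notes on version B (the rewrite author's own statement) =====
-- stated objective: faster
-- what changed: Replaced the repeated min-of-set + set.difference loop with one sorted pass over the distinct values that counts a new group whenever a value exceeds the last group start by more than 4.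
import Mathlib
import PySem

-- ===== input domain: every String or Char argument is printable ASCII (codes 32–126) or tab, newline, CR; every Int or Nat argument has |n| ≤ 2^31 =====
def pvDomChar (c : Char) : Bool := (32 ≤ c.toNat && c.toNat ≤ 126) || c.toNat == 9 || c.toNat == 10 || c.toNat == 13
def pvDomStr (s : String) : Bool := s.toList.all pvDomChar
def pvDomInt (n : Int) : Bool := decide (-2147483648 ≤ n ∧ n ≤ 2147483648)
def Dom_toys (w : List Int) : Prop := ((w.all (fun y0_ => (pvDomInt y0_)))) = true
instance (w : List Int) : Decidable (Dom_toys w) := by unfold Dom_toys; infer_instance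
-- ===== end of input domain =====

-- B replaces A's repeated min-of-set + set.difference loop by a single greedy pass
-- over the sorted distinct values (objective: faster).

-- ===== PORT A =====
-- while len(w) > 0: i += 1; m = min(w); w = w.difference(set(range(m, m+5)))
-- (min? = none exactly when the set is empty, i.e. the loop stops; the fuel argument
--  |s| is only a totality guard: each iteration removes the minimum, so |s| iterations suffice)
def toysLoop (fuel : Nat) (s : PySem.Set Int) (i : Int) : Int :=
  match fuel with
  | 0 => i
  | Nat.succ k =>
      match PySem.List.min? s (fun x => x) with
      | none => i
      | some m =>
          toysLoop k (PySem.Set.diff s (PySem.Set.ofList (PySem.List.pyRange m (m + 5)))) (i + 1)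

def toys (w : List Int) : Int :=
  toysLoop (PySem.Set.ofList w).length (PySem.Set.ofList w) 0

-- ===== PORT B =====
-- loop body of B: state (count, last)
def toysStep (st : Int × Option Int) (v : Int) : Int × Option Int :=
  match st with
  | (c, none) => (c + 1, some v)
  | (c, some l) => if l + 4 < v then (c + 1, some v) else (c, some l)

def toys_alt (w : List Int) : Int :=
  ((PySem.List.sorted (PySem.Set.ofList w) (fun x => x)).foldl toysStep (0, none)).1

-- ===== PRECONDITION & SPEC =====
def Spec_toys (w : List Int) (out : Int) : Prop := out = toys_alt w
instance (w : List Int) (out : Int) : Decidable (Spec_toys w out) := by unfold Spec_toys; infer_instance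

-- ===== CLAIM (what is proved, stated in full; the proofs are below) =====
def Claim_equal_toys : Prop := ∀ (w : List Int), Dom_toys w → Spec_toys w (toys w)

-- ===== LEMMAS AND PROOFS =====

lemma toysRange5 (m : Int) : PySem.List.pyRange m (m + 5) = [m, m + 1, m + 2, m + 3, m + 4] := by
  have h1 : m < m + 5 := by omega
  simp only [PySem.List.pyRange, if_neg (by norm_num : (1 : Int) = 0 → False)]
  simp [h1, List.range_succ]

-- group count of a sorted list of distinct values: proof-side common form
def toysGroups : List Int → Int
  | [] => 0
  | m :: t => 1 + toysGroups (t.filter (fun x => decide (m + 4 < x)))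
termination_by l => l.length
decreasing_by
  simp only [List.length_cons, List.length_unattach]
  exact Nat.lt_succ_of_le (le_trans (List.length_filter_le _ _) (by simp))

lemma toysMin_nil_of_none {s : List Int} (h : PySem.List.min? s (fun x => x) = none) :
    s = [] :=
  Iff.mp (PySem.List.min?_eq_none_iff s (fun x => x)) h

lemma toysLoop_none {s : List Int} (h : PySem.List.min? s (fun x => x) = none)
    (k : ℕ) (i : Int) : toysLoop k s i = i := by
  cases k <;> simp [toysLoop, h]

lemma toysLoop_some {s : List Int} {m : Int}
    (hm : PySem.List.min? s (fun x => x) = some m) (k : ℕ) (i : Int) :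
    toysLoop (k + 1) s i = toysLoop k (List.filter (fun x => decide (m + 4 < x)) s) (i + 1) := by
  have hfe : PySem.Set.diff s (PySem.Set.ofList (PySem.List.pyRange m (m + 5)))
      = List.filter (fun x => decide (m + 4 < x)) s := by
    simp only [PySem.Set.diff]
    apply List.filter_congr
    intro x hx
    have hmx : (m : Int) ≤ x := PySem.List.min?_isMin hm x hx
    have hmem : x ∈ PySem.Set.ofList (PySem.List.pyRange m (m + 5)) ↔ (m ≤ x ∧ x < m + 5) := by
      rw [PySem.Set.mem_ofList, toysRange5]
      constructor
      · intro h; simp at h; omega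
      · intro h; simp; omega
    by_cases hgt : m + 4 < x
    · have hnot : x ∉ PySem.Set.ofList (PySem.List.pyRange m (m + 5)) := by
        intro hc; have := hmem.mp hc; omega
      simp [PySem.Set.contains] at *
      simp_all
    · have hin : x ∈ PySem.Set.ofList (PySem.List.pyRange m (m + 5)) := hmem.mpr ⟨hmx, by omega⟩
      simp [PySem.Set.contains] at *
      simp_all
  simp only [toysLoop, hm, hfe]

lemma toysMin_perm {s s' : List Int} (hp : s.Perm s') :
    PySem.List.min? s (fun x => x) = PySem.List.min? s' (fun x => x) := by
  cases hs : PySem.List.min? s (fun x => x) with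
  | none =>
      have hnil : s = [] := toysMin_nil_of_none hs
      subst hnil
      have hnil' : s' = [] := hp.symm.eq_nil
      subst hnil'
      rfl
  | some m =>
      cases hs' : PySem.List.min? s' (fun x => x) with
      | none =>
          have hnil : s' = [] := toysMin_nil_of_none hs'
          subst hnil
          have hnil' : s = [] := hp.eq_nil
          subst hnil'
          cases hs
      | some m' =>
          have h1 : m ∈ s := PySem.List.min?_mem hs
          have h2 : m' ∈ s' := PySem.List.min?_mem hs'
          have hle : (m : Int) ≤ m' := PySem.List.min?_isMin hs m' (hp.mem_iff.mpr h2)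
          have hge : (m' : Int) ≤ m := PySem.List.min?_isMin hs' m (hp.mem_iff.mp h1)
          rw [le_antisymm hle hge]

lemma toysLoop_perm : ∀ (n : ℕ) (s s' : List Int) (i : Int),
    s.length ≤ n → s.Perm s' → toysLoop n s i = toysLoop n s' i := by
  intro n
  induction n with
  | zero => intro s s' i _ _; rfl
  | succ k ih =>
      intro s s' i hlen hp
      cases hm : PySem.List.min? s (fun x => x) with
      | none =>
          have hm' : PySem.List.min? s' (fun x => x) = none := (toysMin_perm hp).symm.trans hm
          rw [toysLoop_none hm, toysLoop_none hm']
      | some m =>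
          have hm' : PySem.List.min? s' (fun x => x) = some m := (toysMin_perm hp).symm.trans hm
          rw [toysLoop_some hm, toysLoop_some hm']
          have hplt : (List.filter (fun x => decide (m + 4 < x)) s).length < s.length := by
            refine (List.length_filter_lt_length_iff_exists).mpr ⟨m, PySem.List.min?_mem hm, ?_⟩
            simp
          exact ih _ _ _ (by omega) (hp.filter _)

lemma toysMin_sorted_head (m : Int) (t : List Int) (h : ∀ x ∈ t, m ≤ x) :
    PySem.List.min? (m :: t) (fun x => x) = some m := by
  cases hs : PySem.List.min? (m :: t) (fun x => x) with
  | none => exact absurd (toysMin_nil_of_none hs) (by simp)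
  | some m' =>
      have h1 : m' ∈ m :: t := PySem.List.min?_mem hs
      have h2 : (m' : Int) ≤ m := PySem.List.min?_isMin hs m (by simp)
      have h3 : m ≤ m' := by
        rcases List.mem_cons.mp h1 with rfl | hmem
        · exact le_rfl
        · exact h m' hmem
      rw [le_antisymm h2 h3]

lemma toysLoop_sorted : ∀ (n : ℕ) (l : List Int), l.length ≤ n →
    l.Pairwise (· ≤ ·) → ∀ i, toysLoop n l i = i + toysGroups l := by
  intro n
  induction n with
  | zero =>
      intro l hlen _ i
      have : l = [] := List.length_eq_zero_iff.mp (Nat.le_zero.mp hlen)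
      subst this
      simp [toysLoop, toysGroups]
  | succ k ih =>
      intro l hlen hpw i
      cases l with
      | nil =>
          rw [toysLoop_none (s := []) rfl]
          simp [toysGroups]
      | cons m t =>
          have hall : ∀ x ∈ t, m ≤ x := (List.pairwise_cons.mp hpw).1
          have hmin := toysMin_sorted_head m t hall
          rw [toysLoop_some hmin]
          have hfe : List.filter (fun x => decide (m + 4 < x)) (m :: t)
              = List.filter (fun x => decide (m + 4 < x)) t := by
            exact List.filter_cons_of_neg (l := t) (by simp)
          rw [hfe]
          have hpw' : (List.filter (fun x => decide (m + 4 < x)) t).Pairwise (· ≤ ·) :=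
            (List.pairwise_cons.mp hpw).2.sublist List.filter_sublist
          have hlen' : (List.filter (fun x => decide (m + 4 < x)) t).length ≤ k := by
            have := List.length_filter_le (fun x => decide (m + 4 < x)) t
            simp only [List.length_cons] at hlen
            omega
          rw [ih _ hlen' hpw' (i + 1)]
          show i + 1 + toysGroups (t.filter (fun x => decide (m + 4 < x)))
              = i + toysGroups (m :: t)
          rw [toysGroups]
          ring

lemma toysFold_some : ∀ (n : ℕ) (l : List Int), l.length ≤ n → l.Pairwise (· ≤ ·) →
    ∀ (c L : Int),
      (l.foldl toysStep (c, some L)).1 = c + toysGroups (l.filter (fun x => decide (L + 4 < x))) := by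
  intro n
  induction n with
  | zero =>
      intro l hlen _ c L
      have : l = [] := List.length_eq_zero_iff.mp (Nat.le_zero.mp hlen)
      subst this
      simp [toysGroups]
  | succ k ih =>
      intro l hlen hpw c L
      cases l with
      | nil => simp [toysGroups]
      | cons v t =>
          have hall : ∀ x ∈ t, v ≤ x := (List.pairwise_cons.mp hpw).1
          have hpwt : t.Pairwise (· ≤ ·) := (List.pairwise_cons.mp hpw).2
          have hlent : t.length ≤ k := by simp only [List.length_cons] at hlen; omega
          by_cases hv : L + 4 < v
          · have hstep : toysStep (c, some L) v = (c + 1, some v) := by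
              simp [toysStep, hv]
            have hfe : List.filter (fun x => decide (L + 4 < x)) (v :: t)
                = v :: List.filter (fun x => decide (L + 4 < x)) t := by
              simpa using List.filter_cons_of_pos (l := t) (by simp [hv])
            rw [List.foldl_cons, hstep, ih t hlent hpwt (c + 1) v, hfe, toysGroups]
            have hff : (t.filter (fun x => decide (L + 4 < x))).filter (fun x => decide (v + 4 < x))
                = t.filter (fun x => decide (v + 4 < x)) := by
              rw [List.filter_filter]
              apply List.filter_congr
              intro x _
              by_cases hx : v + 4 < x
              · have : L + 4 < x := by omega
                simp [hx, this]
              · simp [hx]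
            rw [hff]
            ring
          · have hstep : toysStep (c, some L) v = (c, some L) := by
              simp [toysStep, hv]
            have hfe : List.filter (fun x => decide (L + 4 < x)) (v :: t)
                = List.filter (fun x => decide (L + 4 < x)) t := by
              simpa using List.filter_cons_of_neg (l := t) (by simp [hv])
            rw [List.foldl_cons, hstep, ih t hlent hpwt c L, hfe]

lemma toysFold_none (l : List Int) (hpw : l.Pairwise (· ≤ ·)) (c : Int) :
    (l.foldl toysStep (c, none)).1 = c + toysGroups l := by
  cases l with
  | nil => simp [toysGroups]
  | cons m t =>
      have hstep : toysStep (c, none) m = (c + 1, some m) := rfl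
      have hpwt : t.Pairwise (· ≤ ·) := (List.pairwise_cons.mp hpw).2
      rw [List.foldl_cons, hstep, toysFold_some t.length t le_rfl hpwt (c + 1) m, toysGroups]
      ring

-- ===== VERDICT (by name: the statement is the Claim_ definition above) =====
theorem toys_spec : Claim_equal_toys := by
  unfold Claim_equal_toys
  intro w _
  unfold Spec_toys toys toys_alt
  set S := PySem.Set.ofList w with hS
  set l := PySem.List.sorted S (fun x => x) with hl
  have hperm : l.Perm S := PySem.List.sorted_perm S (fun x => x) false
  have hpw : l.Pairwise (· ≤ ·) :=
    (PySem.List.sorted_ofList_pairwise_lt w).imp (fun h => le_of_lt h)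
  rw [toysLoop_perm S.length S l 0 le_rfl hperm.symm]
  rw [toysLoop_sorted S.length l (le_of_eq hperm.length_eq) hpw 0]
  rw [toysFold_none l hpw 0]
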